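-- pv_equiv track=rewrite | github.com/ljunker/aoc2024 | src/2019/day04.py | digits_only_two_groups
-- ===== SOURCE A (Python) =====
-- def digits_only_two_groups(digits):
--     last = "blub"
--     length = 0
--     for d in digits:
--         if d != last:
--             if length == 1:
--                 return True
--             length = 0
--             last = d
--         else:
--             length += 1
--     if length == 1:
--         return True
--     return False
-- ===== SOURCE B (Python) =====
-- def digits_only_two_groups(digits):
--     xs = list(digits)
--     n = len(xs)
--     i = 0
--     while i < n:
--         j = i + 1
--         while j < n and xs[j] == xs[i]:
--             j += 1
--         if j - i == 2:
--             return True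
--         i = j
--     return False
-- ===== Notes on version B (the rewrite author's own statement) =====
-- stated objective: alternative
-- what changed: Replaces A's one-element-at-a-time state machine (sentinel last + trailing-count with a duplicated end-of-loop check) by a two-pointer scan that delimits each maximal run and tests its length directly.
-- intended difference: On lists whose first element is the literal string 'blub' forming a leading run of length 1 or 2 with no later run of exactly 2, A's sentinel last='blub' merges the leading run with the sentinel (A returns True for a lone leading 'blub', False for a leading double 'blub'), while B returns the correct run-of-exactly-2 answer (False resp. True), which is the intended behaviour. — e.g. on digits_only_two_groups(["blub"]): A returns true, B returns false
import Mathlib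
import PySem

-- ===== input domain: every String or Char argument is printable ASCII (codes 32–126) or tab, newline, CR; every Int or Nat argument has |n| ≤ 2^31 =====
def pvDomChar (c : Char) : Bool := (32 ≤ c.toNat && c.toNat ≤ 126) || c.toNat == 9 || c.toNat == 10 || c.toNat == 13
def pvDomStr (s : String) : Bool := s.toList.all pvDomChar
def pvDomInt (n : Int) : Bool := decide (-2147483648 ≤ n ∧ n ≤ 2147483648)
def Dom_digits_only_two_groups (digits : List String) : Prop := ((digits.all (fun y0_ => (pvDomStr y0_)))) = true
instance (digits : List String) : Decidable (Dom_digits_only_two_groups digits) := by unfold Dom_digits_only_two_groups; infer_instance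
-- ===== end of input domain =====

-- B is a two-pointer maximal-run scan instead of A's sentinel state machine; B fixes A's "blub" sentinel corner.

-- ===== PORT A =====
-- A's for-loop with early return, carrying the loop state (last, length).
def pvALoop : List String → String → Int → Bool
  | [], _, length => length == 1
  | d :: ds, last, length =>
    if d ≠ last then
      if length == 1 then true
      else pvALoop ds d 0
    else pvALoop ds last (length + 1)

def digits_only_two_groups (digits : List String) : Bool :=
  pvALoop digits "blub" 0

-- ===== PORT B =====
-- inner while: number of further elements equal to xs[i] (run continuation)
def pvBRun (d : String) : List String → Nat
  | [] => 0
  | x :: xs => if x == d then pvBRun d xs + 1 else 0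

-- outer while over the remaining suffix (fuel = initial length bounds the iterations):
-- delimit the leading maximal run, test its length, jump past it
def pvBOuter : Nat → List String → Bool
  | 0, _ => false
  | _, [] => false
  | fuel + 1, x :: xs =>
    if 1 + pvBRun x xs == 2 then true
    else pvBOuter fuel (List.drop (pvBRun x xs) xs)

def digits_only_two_groups_alt (digits : List String) : Bool :=
  pvBOuter digits.length digits

-- ===== PRECONDITION & SPEC =====
-- run-length encoding of the input, used only to state D_ (independent of both ports)
def pvRuns : List String → List (String × Nat)
  | [] => []
  | x :: xs =>
    match pvRuns xs with
    | [] => [(x, 1)]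
    | (y, k) :: rest => if x = y then (x, k + 1) :: rest else (x, 1) :: (y, k) :: rest

def pvDCheck (digits : List String) : Bool :=
  match pvRuns digits with
  | [] => false
  | (y, n) :: rest => (y == "blub") && (n == 1 || n == 2) && rest.all (fun p => !(p.2 == 2))

-- A's sentinel last="blub" merges a leading "blub"-run with the sentinel: when that leading run
-- has length 1 or 2 and no later run has length exactly 2, A returns the wrong answer
-- (True for length 1, False for length 2) while B returns the intended run-of-exactly-2 answer
-- (False resp. True).
def D_digits_only_two_groups (digits : List String) : Prop := pvDCheck digits = true

instance (digits : List String) : Decidable (D_digits_only_two_groups digits) := by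
  unfold D_digits_only_two_groups; infer_instance

def Spec_digits_only_two_groups (digits : List String) (out : Bool) : Prop :=
  ¬ D_digits_only_two_groups digits → out = digits_only_two_groups_alt digits
instance (digits : List String) (out : Bool) : Decidable (Spec_digits_only_two_groups digits out) := by
  unfold Spec_digits_only_two_groups; infer_instance

def pvDiffWitness_digits_only_two_groups : List String := ["blub"]
def pvDiffWitnessOut_digits_only_two_groups : Bool × Bool := (true, false)

-- ===== CLAIM (what is proved, stated in full; the proofs are below) =====
def Claim_unchanged_digits_only_two_groups : Prop := ∀ (digits : List String), Dom_digits_only_two_groups digits → Spec_digits_only_two_groups digits (digits_only_two_groups digits)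
def Claim_changed_digits_only_two_groups : Prop := Dom_digits_only_two_groups (pvDiffWitness_digits_only_two_groups) ∧ D_digits_only_two_groups (pvDiffWitness_digits_only_two_groups) ∧ digits_only_two_groups (pvDiffWitness_digits_only_two_groups) = pvDiffWitnessOut_digits_only_two_groups.1 ∧ digits_only_two_groups_alt (pvDiffWitness_digits_only_two_groups) = pvDiffWitnessOut_digits_only_two_groups.2 ∧ pvDiffWitnessOut_digits_only_two_groups.1 ≠ pvDiffWitnessOut_digits_only_two_groups.2
def Claim_exact_digits_only_two_groups : Prop := ∀ (digits : List String), Dom_digits_only_two_groups digits → D_digits_only_two_groups digits → digits_only_two_groups digits ≠ digits_only_two_groups_alt digits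

-- ===== LEMMAS AND PROOFS =====

-- "some maximal run has length exactly 2", the common semantic yardstick
def pvAny2 (xs : List String) : Bool := (pvRuns xs).any (fun p => p.2 == 2)

-- pvRuns splits off the leading maximal run
theorem pvRuns_eq (x : String) (xs : List String) :
    pvRuns (x :: xs) = match pvRuns xs with
      | [] => [(x, 1)]
      | (y, k) :: rest => if x = y then (x, k + 1) :: rest else (x, 1) :: (y, k) :: rest := rfl

theorem pvRuns_cons (xs : List String) (x : String) :
    pvRuns (x :: xs) = (x, 1 + pvBRun x xs) :: pvRuns (List.drop (pvBRun x xs) xs) := by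
  induction xs generalizing x with
  | nil => simp [pvRuns, pvBRun]
  | cons y ys ih =>
    rw [pvRuns_eq x (y :: ys), ih y]
    by_cases h : x = y
    · subst h
      have hbx : pvBRun x (x :: ys) = pvBRun x ys + 1 := by simp [pvBRun]
      rw [hbx, List.drop_succ_cons]
      have h2 : (1 + pvBRun x ys) + 1 = 1 + (pvBRun x ys + 1) := by omega
      simp [h2]
    · have hb0 : pvBRun x (y :: ys) = 0 := by
        simp [pvBRun]; simpa using fun e => h e.symm
      rw [hb0, List.drop_zero]
      simp only [if_neg h]
      rw [← ih y]

-- B returns true iff some maximal run has length exactly 2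
theorem pvBOuter_eq (fuel : Nat) (xs : List String) (h : xs.length ≤ fuel) :
    pvBOuter fuel xs = pvAny2 xs := by
  induction fuel generalizing xs with
  | zero =>
    have : xs = [] := by cases xs <;> simp_all
    subst this; simp [pvBOuter, pvAny2, pvRuns]
  | succ fuel ih =>
    cases xs with
    | nil => simp [pvBOuter, pvAny2, pvRuns]
    | cons x xs =>
      rw [pvBOuter, pvAny2, pvRuns_cons, List.any_cons]
      have hlen : (List.drop (pvBRun x xs) xs).length ≤ fuel := by
        simp only [List.length_drop]
        simp at h; omega
      rw [ih _ hlen]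
      by_cases h2 : 1 + pvBRun x xs = 2 <;> simp [h2, pvAny2]

theorem b_eq (xs : List String) : digits_only_two_groups_alt xs = pvAny2 xs :=
  pvBOuter_eq _ _ le_rfl

-- A's loop, related to the run view: the pending count len plus the continuation of the
-- current run decides the current run, the rest is the plain any-run-of-2 question.
theorem aLoop_eq (xs : List String) (last : String) (len : Int) :
    pvALoop xs last len =
      ((len + (pvBRun last xs : Int) == 1) || pvAny2 (List.drop (pvBRun last xs) xs)) := by
  induction xs generalizing last len with
  | nil => simp [pvALoop, pvBRun, pvAny2, pvRuns]
  | cons x xs ih =>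
    by_cases h : x = last
    · subst h
      have hb : pvBRun x (x :: xs) = pvBRun x xs + 1 := by simp [pvBRun]
      rw [pvALoop, if_neg (by simp), hb, ih, List.drop_succ_cons]
      have : len + ((pvBRun x xs + 1 : Nat) : Int) = (len + 1) + (pvBRun x xs : Int) := by
        push_cast; ring
      rw [this]
    · have hb : pvBRun last (x :: xs) = 0 := by
        simp [pvBRun, beq_eq_false_iff_ne.mpr h]
      rw [pvALoop, if_pos (by simpa using h), hb, List.drop_zero]
      have hB : pvAny2 (x :: xs) = ((1 + pvBRun x xs == 2) || pvAny2 (List.drop (pvBRun x xs) xs)) := by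
        rw [pvAny2, pvRuns_cons, List.any_cons]; rfl
      by_cases hl : len = 1
      · subst hl; simp [hB]
      · have h1 : (len == 1) = false := by simpa using hl
        have h2 : (len + ((0 : Nat) : Int) == 1) = false := by simp; omega
        rw [if_neg (by simp [hl]), ih, h2, Bool.false_or, hB]
        have : ((0 : Int) + (pvBRun x xs : Int) == 1) = (1 + pvBRun x xs == 2) := by
          by_cases hk : pvBRun x xs = 1
          · simp [hk]
          · simp [hk]; omega
        rw [this]

-- the three-way story on inputs with head "blub": A, B and D_ in terms of k and R
theorem main_eq (digits : List String) :
    (¬ D_digits_only_two_groups digits →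
      digits_only_two_groups digits = digits_only_two_groups_alt digits)
    ∧ (D_digits_only_two_groups digits →
      digits_only_two_groups digits ≠ digits_only_two_groups_alt digits) := by
  cases digits with
  | nil => exact ⟨fun _ => by decide, fun hd => absurd hd (by decide)⟩
  | cons x xs =>
    by_cases hx : x = "blub"
    · subst hx
      have hb : pvBRun "blub" ("blub" :: xs) = pvBRun "blub" xs + 1 := by simp [pvBRun]
      have hA : digits_only_two_groups ("blub" :: xs)
          = ((pvBRun "blub" xs + 1 == 1) || pvAny2 (List.drop (pvBRun "blub" xs) xs)) := by
        rw [digits_only_two_groups, aLoop_eq, hb, List.drop_succ_cons]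
        have : ((0 : Int) + ((pvBRun "blub" xs + 1 : Nat) : Int) == 1)
            = (pvBRun "blub" xs + 1 == 1) := by
          by_cases hk : pvBRun "blub" xs = 0
          · simp [hk]
          · simp [hk]
        rw [this]
      have hB : digits_only_two_groups_alt ("blub" :: xs)
          = ((1 + pvBRun "blub" xs == 2) || pvAny2 (List.drop (pvBRun "blub" xs) xs)) := by
        rw [b_eq, pvAny2, pvRuns_cons, List.any_cons]; rfl
      have hD : D_digits_only_two_groups ("blub" :: xs) ↔
          ((pvBRun "blub" xs = 0 ∨ pvBRun "blub" xs = 1)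
            ∧ pvAny2 (List.drop (pvBRun "blub" xs) xs) = false) := by
        rw [D_digits_only_two_groups, pvDCheck, pvRuns_cons, pvAny2]
        simp [List.all_eq_true, List.any_eq_false]
        omega
      set k := pvBRun "blub" xs with hk
      set R := pvAny2 (List.drop k xs) with hR
      constructor
      · intro hnd
        rw [hA, hB]
        rw [hD] at hnd
        cases hr : R with
        | true => simp
        | false =>
          have hknot : ¬ (k = 0 ∨ k = 1) := fun hk01 => hnd ⟨hk01, hr⟩
          have e1 : (k + 1 == 1) = false := by simp; omega
          have e2 : (1 + k == 2) = false := by simp; omega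
          rw [e1, e2]
      · intro hd
        rw [hD] at hd
        obtain ⟨hk01, hr⟩ := hd
        rw [hA, hB, hr, Bool.or_false, Bool.or_false]
        rcases hk01 with h0 | h1
        · rw [h0]; decide
        · rw [h1]; decide
    · have hb : pvBRun "blub" (x :: xs) = 0 := by
        simp [pvBRun, beq_eq_false_iff_ne.mpr hx]
      have hA : digits_only_two_groups (x :: xs) = pvAny2 (x :: xs) := by
        rw [digits_only_two_groups, aLoop_eq, hb, List.drop_zero]
        simp
      have hDf : ¬ D_digits_only_two_groups (x :: xs) := by
        rw [D_digits_only_two_groups, pvDCheck, pvRuns_cons]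
        simp [hx]
      exact ⟨fun _ => by rw [hA, b_eq], fun hd => absurd hd hDf⟩

-- ===== VERDICT (by name: the statement is the Claim_ definition above) =====
theorem digits_only_two_groups_spec : Claim_unchanged_digits_only_two_groups := by
  intro digits _ hD
  exact (main_eq digits).1 hD

theorem digits_only_two_groups_changed : Claim_changed_digits_only_two_groups := by
  unfold Claim_changed_digits_only_two_groups; decide

theorem digits_only_two_groups_tight : Claim_exact_digits_only_two_groups := by
  intro digits _ hd
  exact (main_eq digits).2 hd
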